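-- pv_equiv track=rewrite | github.com/TJank/pythonProgramming | Chapter4/homeWorkCh4.py | txtmsg_to_english
-- ===== SOURCE A (Python) =====
-- txtabrvs = {"2F4U": "Too Fast For You",
--             ("4YEO", "FYEO") : "For Your Eyes Only",
--             "AAMOF" : "As a Matter of Fact",
--             "AFK" : "Away from Keyboard",
--             "AKA" : "Also known as",
--             "BTW" : "By the Way",
--             "B/C" : "Because",
--             "FWIW" : "For what it's Worth",
--             "FYI" : "For your Information",
--             "FTW" : "For the Win",
--             "HF" : "Have fun",
--             "HTH" : "Hope this Helps",
--             "IDK" : "I don't know"}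
--
-- def txtmsg_to_english(textMessage):
--     plain_text = ""
--     word = ""
--
--     for i in range(len(textMessage)):
--         if textMessage[i] is " ":
--             if word in txtabrvs.keys():
--                 plain_text += " " + txtabrvs[word]
--                 word = ""
--                 continue
--             else:
--                 plain_text += " " + word
--                 word = ""
--                 continue
--         else:
--             word += textMessage[i]
--
--     return plain_text
-- ===== SOURCE B (Python) =====
-- # Split-then-map re-implementation: expand each space-terminated word via dict.get.
-- # Only the string keys of the original table are kept (its tuple key can never equal a word).
-- TXTABRVS = {"2F4U": "Too Fast For You",
--             "AAMOF": "As a Matter of Fact",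
--             "AFK": "Away from Keyboard",
--             "AKA": "Also known as",
--             "BTW": "By the Way",
--             "B/C": "Because",
--             "FWIW": "For what it's Worth",
--             "FYI": "For your Information",
--             "FTW": "For the Win",
--             "HF": "Have fun",
--             "HTH": "Hope this Helps",
--             "IDK": "I don't know"}
--
-- def txtmsg_to_english(textMessage):
--     words = textMessage.split(' ')
--     return ''.join(' ' + TXTABRVS.get(w, w) for w in words[:-1])
-- ===== Notes on version B (the rewrite author's own statement) =====
-- stated objective: faster
-- what changed: Replaces A's character-by-character accumulate-and-flush loop (per-character string concatenation onto growing buffers) by a one-shot split on the space separator followed by a single map over the space-terminated words using dict.get joined once.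
import Mathlib
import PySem

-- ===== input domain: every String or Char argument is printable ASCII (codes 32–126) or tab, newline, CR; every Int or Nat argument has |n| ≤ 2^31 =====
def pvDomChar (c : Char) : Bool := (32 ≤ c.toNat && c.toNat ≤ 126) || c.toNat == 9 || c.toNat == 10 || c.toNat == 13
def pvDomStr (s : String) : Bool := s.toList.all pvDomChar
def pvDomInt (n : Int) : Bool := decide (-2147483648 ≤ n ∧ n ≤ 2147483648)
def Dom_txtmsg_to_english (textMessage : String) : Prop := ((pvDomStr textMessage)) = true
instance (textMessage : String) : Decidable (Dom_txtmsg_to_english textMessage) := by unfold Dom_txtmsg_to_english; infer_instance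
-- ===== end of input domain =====

-- B replaces A's character-by-character accumulate-and-flush scan by one split on spaces and a
-- single map over the space-terminated words (A never flushes the last word; B reproduces that).

-- ===== PORT A =====
-- A's dict has 12 string keys and one tuple key; key type = String ⊕ (String × String) as List Char.
def txtabrvsA : PySem.Dict ((List Char) ⊕ ((List Char) × (List Char))) (List Char) :=
  PySem.Dict.ofList
    [(Sum.inl "2F4U".toList, "Too Fast For You".toList),
     (Sum.inr ("4YEO".toList, "FYEO".toList), "For Your Eyes Only".toList),
     (Sum.inl "AAMOF".toList, "As a Matter of Fact".toList),
     (Sum.inl "AFK".toList, "Away from Keyboard".toList),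
     (Sum.inl "AKA".toList, "Also known as".toList),
     (Sum.inl "BTW".toList, "By the Way".toList),
     (Sum.inl "B/C".toList, "Because".toList),
     (Sum.inl "FWIW".toList, "For what it's Worth".toList),
     (Sum.inl "FYI".toList, "For your Information".toList),
     (Sum.inl "FTW".toList, "For the Win".toList),
     (Sum.inl "HF".toList, "Have fun".toList),
     (Sum.inl "HTH".toList, "Hope this Helps".toList),
     (Sum.inl "IDK".toList, "I don't know".toList)]

-- loop body: `if textMessage[i] is " ":` flush `word` (expanded if it is a key), else extend `word`.
-- `word in txtabrvs.keys()` followed by `txtabrvs[word]` is one lookup: the some-branch is the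
-- key-present branch, the none-branch the else-branch.
def stepA (st : List Char × List Char) (c : Char) : List Char × List Char :=
  if c = ' ' then
    match txtabrvsA.get? (Sum.inl st.2) with
    | some v => (st.1 ++ ' ' :: v, [])
    | none   => (st.1 ++ ' ' :: st.2, [])
  else (st.1, st.2 ++ [c])

def txtmsg_to_english (textMessage : String) : String :=
  String.mk (textMessage.toList.foldl stepA ([], [])).1

-- ===== PORT B =====
-- B keeps only the string keys (the tuple key can never equal a word).
def txtabrvsB : PySem.Dict (List Char) (List Char) :=
  PySem.Dict.ofList
    [("2F4U".toList, "Too Fast For You".toList),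
     ("AAMOF".toList, "As a Matter of Fact".toList),
     ("AFK".toList, "Away from Keyboard".toList),
     ("AKA".toList, "Also known as".toList),
     ("BTW".toList, "By the Way".toList),
     ("B/C".toList, "Because".toList),
     ("FWIW".toList, "For what it's Worth".toList),
     ("FYI".toList, "For your Information".toList),
     ("FTW".toList, "For the Win".toList),
     ("HF".toList, "Have fun".toList),
     ("HTH".toList, "Hope this Helps".toList),
     ("IDK".toList, "I don't know".toList)]

-- words = textMessage.split(' '); ''.join(' ' + TXTABRVS.get(w, w) for w in words[:-1])
def txtmsg_to_english_alt (textMessage : String) : String :=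
  let words := PySem.Chars.splitOn textMessage.toList [' ']
  String.mk (PySem.Chars.join []
     ((PySem.List.slice words none (some (-1))).map (fun w => ' ' :: txtabrvsB.getD w w)))

-- ===== PRECONDITION & SPEC =====
def Spec_txtmsg_to_english (textMessage : String) (out : String) : Prop := out = txtmsg_to_english_alt textMessage
instance (textMessage : String) (out : String) : Decidable (Spec_txtmsg_to_english textMessage out) := by unfold Spec_txtmsg_to_english; infer_instance

-- ===== CLAIM (what is proved, stated in full; the proofs are below) =====
def Claim_equal_txtmsg_to_english : Prop := ∀ (textMessage : String), Dom_txtmsg_to_english textMessage → Spec_txtmsg_to_english textMessage (txtmsg_to_english textMessage)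

-- ===== LEMMAS AND PROOFS =====

-- BEq on the sum key type reduces definitionally
theorem inl_beq_inl (a b : List Char) :
    (Sum.inl a == (Sum.inl b : (List Char) ⊕ ((List Char) × (List Char)))) = (a == b) := rfl
theorem inr_beq_inl (t : (List Char) × (List Char)) (b : List Char) :
    (Sum.inr t == (Sum.inl b : (List Char) ⊕ ((List Char) × (List Char)))) = false := rfl

-- A's lookup at a string key agrees with B's lookup
theorem lookupAB (w : List Char) : txtabrvsA.get? (Sum.inl w) = txtabrvsB.get? w := by
  have hA : txtabrvsA.items =
    [(Sum.inl "2F4U".toList, "Too Fast For You".toList),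
     (Sum.inr ("4YEO".toList, "FYEO".toList), "For Your Eyes Only".toList),
     (Sum.inl "AAMOF".toList, "As a Matter of Fact".toList),
     (Sum.inl "AFK".toList, "Away from Keyboard".toList),
     (Sum.inl "AKA".toList, "Also known as".toList),
     (Sum.inl "BTW".toList, "By the Way".toList),
     (Sum.inl "B/C".toList, "Because".toList),
     (Sum.inl "FWIW".toList, "For what it's Worth".toList),
     (Sum.inl "FYI".toList, "For your Information".toList),
     (Sum.inl "FTW".toList, "For the Win".toList),
     (Sum.inl "HF".toList, "Have fun".toList),
     (Sum.inl "HTH".toList, "Hope this Helps".toList),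
     (Sum.inl "IDK".toList, "I don't know".toList)] := by decide
  have hB : txtabrvsB.items =
    [("2F4U".toList, "Too Fast For You".toList),
     ("AAMOF".toList, "As a Matter of Fact".toList),
     ("AFK".toList, "Away from Keyboard".toList),
     ("AKA".toList, "Also known as".toList),
     ("BTW".toList, "By the Way".toList),
     ("B/C".toList, "Because".toList),
     ("FWIW".toList, "For what it's Worth".toList),
     ("FYI".toList, "For your Information".toList),
     ("FTW".toList, "For the Win".toList),
     ("HF".toList, "Have fun".toList),
     ("HTH".toList, "Hope this Helps".toList),
     ("IDK".toList, "I don't know".toList)] := by decide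
  simp only [PySem.Dict.get?, hA, hB, List.find?, inl_beq_inl, inr_beq_inl]
  repeat' split <;> simp_all

-- reference splitter: mySplit l = l.split(' ') (Python semantics, single-char sep)
def mySplit : List Char → List (List Char)
  | [] => [[]]
  | c :: rest => if c = ' ' then [] :: mySplit rest else (mySplit rest).modifyHead (c :: ·)

theorem mySplit_ne_nil (l : List Char) : mySplit l ≠ [] := by
  cases l with
  | nil => simp [mySplit]
  | cons c rest =>
    by_cases h : c = ' '
    · simp [mySplit, h]
    · have := mySplit_ne_nil rest
      cases hm : mySplit rest with
      | nil => exact absurd hm this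
      | cons a t => simp [mySplit, h, hm]

theorem splitOn_go_eq (fuel : Nat) : ∀ (l cur : List Char) (acc : List (List Char)),
    l.length < fuel →
    PySem.Chars.splitOn.go [' '] fuel l cur acc
      = acc.reverse ++ (mySplit l).modifyHead (cur.reverse ++ ·) := by
  induction fuel with
  | zero => intro l cur acc h; exact absurd h (by omega)
  | succ f ih =>
    intro l cur acc h
    cases l with
    | nil =>
      rw [PySem.Chars.splitOn.go]
      · simp [mySplit]
      · omega
    | cons c rest =>
      by_cases hc : c = ' '
      · subst hc
        rw [PySem.Chars.splitOn.go]
        simp only [List.isPrefixOf, BEq.rfl, Bool.true_and, if_true,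
          List.length_cons, List.drop_succ_cons, List.drop_zero, List.length_nil]
        rw [ih rest [] (cur.reverse :: acc) (by simpa using Nat.lt_of_succ_lt_succ h)]
        have hne := mySplit_ne_nil rest
        cases hm : mySplit rest with
        | nil => exact absurd hm hne
        | cons a t => simp [mySplit, hm]
      · rw [PySem.Chars.splitOn.go]
        have hpre : ([' '].isPrefixOf (c :: rest)) = false := by
          simp only [List.isPrefixOf, Bool.and_true, beq_eq_false_iff_ne]
          exact fun h => hc h.symm
        rw [if_neg (by simp [hpre])]
        rw [ih rest (c :: cur) acc (by simpa using Nat.lt_of_succ_lt_succ h)]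
        have hne := mySplit_ne_nil rest
        cases hm : mySplit rest with
        | nil => exact absurd hm hne
        | cons a t => simp [mySplit, hc, hm]

theorem splitOn_eq (l : List Char) : PySem.Chars.splitOn l [' '] = mySplit l := by
  rw [PySem.Chars.splitOn, splitOn_go_eq (l.length + 1) l [] [] (by omega)]
  have hne := mySplit_ne_nil l
  cases hm : mySplit l with
  | nil => exact absurd hm hne
  | cons a t => simp

theorem mySplit_sfree {w : List Char} (h : ' ' ∉ w) : mySplit w = [w] := by
  induction w with
  | nil => rfl
  | cons c rest ih =>
    simp only [List.mem_cons, not_or] at h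
    simp [mySplit, Ne.symm h.1, ih h.2]

theorem mySplit_append {w : List Char} (cs : List Char) (h : ' ' ∉ w) :
    mySplit (w ++ ' ' :: cs) = w :: mySplit cs := by
  induction w with
  | nil => simp [mySplit]
  | cons c rest ih =>
    simp only [List.mem_cons, not_or] at h
    simp [mySplit, Ne.symm h.1, ih h.2]

def expandB (w : List Char) : List Char := ' ' :: txtabrvsB.getD w w

theorem joinNil (l : List (List Char)) : PySem.Chars.join [] l = l.flatten := by
  induction l with
  | nil => simp [PySem.Chars.join, List.intercalate]
  | cons a t ih =>
    cases t with
    | nil => simp [PySem.Chars.join, List.intercalate]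
    | cons b t2 =>
      rw [PySem.Chars.join_cons_cons, ih]
      simp

theorem loopA_spec : ∀ (cs p w : List Char), ' ' ∉ w →
    (cs.foldl stepA (p, w)).1 = p ++ (((mySplit (w ++ cs)).dropLast).map expandB).flatten := by
  intro cs
  induction cs with
  | nil =>
    intro p w hw
    simp [mySplit_sfree hw]
  | cons c cs ih =>
    intro p w hw
    by_cases hc : c = ' '
    · subst hc
      rw [mySplit_append cs hw,
          List.dropLast_cons_of_ne_nil (mySplit_ne_nil cs)]
      have hstep : stepA (p, w) ' ' = (p ++ expandB w, []) := by
        simp only [stepA, lookupAB, reduceIte]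
        cases h : txtabrvsB.get? w <;>
          simp [expandB, PySem.Dict.getD, h]
      simp only [List.foldl_cons, hstep]
      rw [ih (p ++ expandB w) [] (by simp)]
      simp
    · have hstep : stepA (p, w) c = (p, w ++ [c]) := by
        simp [stepA, hc]
      have hw' : ' ' ∉ w ++ [c] := by
        simp [List.mem_append, hw, Ne.symm hc]
      simp only [List.foldl_cons, hstep]
      rw [ih p (w ++ [c]) hw']
      simp

-- ===== VERDICT (by name: the statement is the Claim_ definition above) =====
theorem txtmsg_to_english_spec : Claim_equal_txtmsg_to_english := by
  intro s _
  unfold Spec_txtmsg_to_english txtmsg_to_english txtmsg_to_english_alt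
  rw [loopA_spec s.toList [] [] (by simp)]
  simp only [splitOn_eq, PySem.List.slice_to_neg_one, joinNil]
  simp only [List.nil_append]
  rfl
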